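-- pv_equiv track=rewrite | github.com/NetworkBuild3r/archivist-oss | benchmarks/pipeline/run_progress.py | _should_log_milestone
-- ===== SOURCE A (Python) =====
-- def _should_log_milestone(i: int, total: int, pct_step: int) -> bool:
--     """Log when crossing 10%, 20%, ... or on the final query (1-based ``i``)."""
--     if total <= 0:
--         return False
--     if i == total:
--         return True
--     pct_step = max(1, pct_step)
--     curr = (100 * i) // total
--     prev = (100 * (i - 1)) // total if i > 1 else -1
--     for boundary in range(pct_step, 100, pct_step):
--         if prev < boundary <= curr:
--             return True
--     return False
-- ===== SOURCE B (Python) =====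
-- def _should_log_milestone(i: int, total: int, pct_step: int) -> bool:
--     """Log when crossing 10%, 20%, ... or on the final query (1-based ``i``)."""
--     if total <= 0:
--         return False
--     if i == total:
--         return True
--     p = max(1, pct_step)
--     done = max(0, 100 * (i - 1))      # percent-points completed before query i, clamped at 0
--     b = (done // total // p + 1) * p  # first milestone strictly above the previous percentage
--     return b < 100 and b * total <= 100 * i
-- ===== Notes on version B (the rewrite author's own statement) =====
-- stated objective: simpler
-- what changed: Instead of computing prev/curr percentages and scanning every boundary in range(pct_step,100,pct_step), B computes the first milestone strictly above the already-completed percentage in closed form and checks that single candidate with one multiplication comparison.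
import Mathlib
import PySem

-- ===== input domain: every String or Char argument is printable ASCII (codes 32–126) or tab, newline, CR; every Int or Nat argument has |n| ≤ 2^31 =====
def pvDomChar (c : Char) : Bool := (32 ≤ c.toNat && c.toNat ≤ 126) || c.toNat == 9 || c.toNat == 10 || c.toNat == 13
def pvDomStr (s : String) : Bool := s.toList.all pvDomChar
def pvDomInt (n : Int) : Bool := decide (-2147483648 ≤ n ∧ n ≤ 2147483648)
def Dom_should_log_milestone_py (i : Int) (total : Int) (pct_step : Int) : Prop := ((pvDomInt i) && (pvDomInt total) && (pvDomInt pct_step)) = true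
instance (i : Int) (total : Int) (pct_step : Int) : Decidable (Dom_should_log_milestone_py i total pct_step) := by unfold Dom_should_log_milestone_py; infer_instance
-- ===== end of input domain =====

-- B drops A's prev/curr percentages and boundary scan entirely: it computes the FIRST milestone
-- strictly above the already-completed percentage in closed form and makes one check (objective: simpler).

-- ===== PORT A =====
def should_log_milestone_py (i : Int) (total : Int) (pct_step : Int) : Bool :=
  if total ≤ 0 then false
  else if i = total then true
  else
    let p := max 1 pct_step
    let curr := PySem.Int.floordiv (100 * i) total
    let prev := if i > 1 then PySem.Int.floordiv (100 * (i - 1)) total else -1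
    -- the for-loop with early 'return True' over range(pct_step, 100, pct_step)
    (PySem.List.pyRange p 100 p).any (fun b => decide (prev < b) && decide (b ≤ curr))

-- ===== PORT B =====
def should_log_milestone_py_alt (i : Int) (total : Int) (pct_step : Int) : Bool :=
  if total ≤ 0 then false
  else if i = total then true
  else
    let p := max 1 pct_step
    let done := max 0 (100 * (i - 1))
    let b := (PySem.Int.floordiv (PySem.Int.floordiv done total) p + 1) * p
    decide (b < 100) && decide (b * total ≤ 100 * i)

-- ===== PRECONDITION & SPEC =====
def Spec_should_log_milestone_py (i : Int) (total : Int) (pct_step : Int) (out : Bool) : Prop := out = should_log_milestone_py_alt i total pct_step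
instance (i : Int) (total : Int) (pct_step : Int) (out : Bool) : Decidable (Spec_should_log_milestone_py i total pct_step out) := by unfold Spec_should_log_milestone_py; infer_instance

-- ===== CLAIM (what is proved, stated in full; the proofs are below) =====
def Claim_equal_should_log_milestone_py : Prop := ∀ (i : Int) (total : Int) (pct_step : Int), Dom_should_log_milestone_py i total pct_step → Spec_should_log_milestone_py i total pct_step (should_log_milestone_py i total pct_step)

-- ===== LEMMAS AND PROOFS =====

-- membership in a positive-step Python range
theorem mem_pyRange_pos {a b step x : Int} (hs : 0 < step) :
    x ∈ PySem.List.pyRange a b step ↔ ∃ k : ℕ, x = a + step * k ∧ x < b := by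
  have key : ∀ k : ℕ, (k < ((b - a + step - 1) / step).toNat) ↔ a + step * (k : Int) < b := by
    intro k
    rw [Int.lt_toNat, Int.lt_iff_add_one_le, Int.le_ediv_iff_mul_le hs]
    constructor <;> intro h <;> nlinarith
  unfold PySem.List.pyRange
  rw [if_neg hs.ne']
  simp only [hs, if_pos, List.mem_map, List.mem_range]
  by_cases hab : a < b
  · rw [if_pos hab]
    constructor
    · rintro ⟨k, hk, rfl⟩
      exact ⟨k, rfl, (key k).mp hk⟩
    · rintro ⟨k, rfl, hlt⟩
      exact ⟨k, (key k).mpr hlt, rfl⟩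
  · rw [if_neg hab]
    constructor
    · rintro ⟨k, hk, rfl⟩
      exact absurd hk (by simp)
    · rintro ⟨k, rfl, h⟩
      have : 0 ≤ step * (k : Int) := by positivity
      omega

-- A's boundary scan agrees with B's first-milestone check, for any p > 0 and total > 0
theorem core_eq (i total p : Int) (ht : 0 < total) (hp : 0 < p) :
    ((PySem.List.pyRange p 100 p).any
        (fun b => decide ((if i > 1 then PySem.Int.floordiv (100 * (i - 1)) total else -1) < b)
          && decide (b ≤ PySem.Int.floordiv (100 * i) total)))
      = (decide ((PySem.Int.floordiv (PySem.Int.floordiv (max 0 (100 * (i - 1))) total) p + 1) * p < 100)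
          && decide ((PySem.Int.floordiv (PySem.Int.floordiv (max 0 (100 * (i - 1))) total) p + 1) * p * total ≤ 100 * i)) := by
  rw [← Bool.coe_iff_coe]
  simp only [List.any_eq_true, Bool.and_eq_true, decide_eq_true_eq,
    PySem.Int.floordiv_eq_ediv_of_pos ht, PySem.Int.floordiv_eq_ediv_of_pos hp]
  set d := max 0 (100 * (i - 1)) / total with hd
  set q := d / p with hq
  have hd0 : 0 ≤ d := Int.ediv_nonneg (by omega) ht.le
  have hq0 : 0 ≤ q := Int.ediv_nonneg hd0 hp.le
  have hdq : p * q ≤ d ∧ d < p * (q + 1) := by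
    have h1 : d % p + p * q = d := by rw [hq]; exact Int.emod_add_mul_ediv d p
    have h2 : 0 ≤ d % p := Int.emod_nonneg d hp.ne'
    have h3 : d % p < p := Int.emod_lt_of_pos d hp
    constructor <;> [omega; nlinarith [h1, h3]]
  have hprev : (if i > 1 then 100 * (i - 1) / total else -1) ≤ d := by
    split_ifs with h1
    · have : max 0 (100 * (i - 1)) = 100 * (i - 1) := by omega
      rw [hd, this]
    · omega
  constructor
  · rintro ⟨x, hx, h1, h2⟩
    rcases (mem_pyRange_pos hp).mp hx with ⟨k, rfl, hlt⟩
    -- q < k + 1, hence b0 = (q+1)*p ≤ p + p*k = x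
    have hk1 : q < (k : Int) + 1 := by
      by_contra h
      push Not at h
      have hxd : p + p * (k : Int) ≤ p * q := by nlinarith
      have hdval : d < p + p * (k : Int) := by
        rcases lt_or_ge 1 i with hi | hi
        · have : max 0 (100 * (i - 1)) = 100 * (i - 1) := by omega
          simp only [hi, if_pos] at h1
          rw [hd, this]; exact h1
        · have : max 0 (100 * (i - 1)) = 0 := by omega
          rw [hd, this]
          have : 0 ≤ p * (k : Int) := by positivity
          simp only [Int.zero_ediv]; omega
      omega
    have hble : (q + 1) * p ≤ p + p * (k : Int) := by nlinarith
    have hcurr : (p + p * (k : Int)) * total ≤ 100 * i := by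
      rw [Int.le_ediv_iff_mul_le ht] at h2; exact h2
    exact ⟨by omega, by nlinarith⟩
  · rintro ⟨hb100, hbt⟩
    refine ⟨(q + 1) * p, (mem_pyRange_pos hp).mpr ⟨q.toNat, ?_, hb100⟩, ?_, ?_⟩
    · have : ((q.toNat : Int)) = q := Int.toNat_of_nonneg hq0
      rw [this]; ring
    · -- prev < first milestone
      have : d < (q + 1) * p := by nlinarith [hdq.2]
      split_ifs with h1
      · have hmx : max 0 (100 * (i - 1)) = 100 * (i - 1) := by omega
        rw [hd, hmx] at this; omega
      · nlinarith [hq0, hp]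
    · rw [Int.le_ediv_iff_mul_le ht]; exact hbt

-- ===== VERDICT (by name: the statement is the Claim_ definition above) =====
theorem should_log_milestone_py_spec : Claim_equal_should_log_milestone_py := by
  intro i total pct_step _
  unfold Spec_should_log_milestone_py should_log_milestone_py should_log_milestone_py_alt
  by_cases h1 : total ≤ 0
  · simp [h1]
  · by_cases h2 : i = total
    · simp [h1, h2]
    · simp only [if_neg h1, if_neg h2]
      exact core_eq i total (max 1 pct_step) (by omega) (by omega)
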